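-- pv_equiv track=rewrite | github.com/vuhcl/vinyl-management-system | price_estimator/src/scrape/discogs_release_listings_parse.py | _parse_media_sleeve_from_condition_block
-- ===== SOURCE A (Python) =====
-- def _parse_media_sleeve_from_condition_block(text: str) -> tuple[str, str]:
--     """
--     Parse ``p.item_condition`` body: lines like ``Media: ...`` / ``Sleeve: ...``.
--     Returns (raw_media, raw_sleeve) — may be empty if not in Discogs format.
--     """
--     raw_media = ""
--     raw_sleeve = ""
--     if not text or not text.strip():
--         return raw_media, raw_sleeve
--     for line in text.replace("\r\n", "\n").split("\n"):
--         line = line.strip()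
--         if not line:
--             continue
--         low = line.lower()
--         if low.startswith("media:"):
--             raw_media = line.split(":", 1)[1].strip()
--         elif low.startswith("sleeve:"):
--             raw_sleeve = line.split(":", 1)[1].strip()
--     return raw_media, raw_sleeve
-- ===== SOURCE B (Python) =====
-- def _parse_media_sleeve_from_condition_block(text: str) -> tuple[str, str]:
--     """Scan lines back-to-front, keeping the first match per key (== last in
--     document order) and stopping early once both are found."""
--     media = None
--     sleeve = None
--     for line in reversed(text.replace("\r\n", "\n").split("\n")):
--         s = line.strip()
--         low = s.lower()
--         if media is None and low.startswith("media:"):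
--             media = s[6:].strip()
--         if sleeve is None and low.startswith("sleeve:"):
--             sleeve = s[7:].strip()
--         if media is not None and sleeve is not None:
--             break
--     return (media if media is not None else "", sleeve if sleeve is not None else "")
-- ===== Notes on version B (the rewrite author's own statement) =====
-- stated objective: alternative
-- what changed: Instead of a forward fold that overwrites media/sleeve on every matching line (last-wins by overwriting), B scans the lines back-to-front keeping the FIRST match per key and breaking out early once both are found, slicing the value off at the fixed prefix length instead of re-splitting the line at the separator.
import Mathlib
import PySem

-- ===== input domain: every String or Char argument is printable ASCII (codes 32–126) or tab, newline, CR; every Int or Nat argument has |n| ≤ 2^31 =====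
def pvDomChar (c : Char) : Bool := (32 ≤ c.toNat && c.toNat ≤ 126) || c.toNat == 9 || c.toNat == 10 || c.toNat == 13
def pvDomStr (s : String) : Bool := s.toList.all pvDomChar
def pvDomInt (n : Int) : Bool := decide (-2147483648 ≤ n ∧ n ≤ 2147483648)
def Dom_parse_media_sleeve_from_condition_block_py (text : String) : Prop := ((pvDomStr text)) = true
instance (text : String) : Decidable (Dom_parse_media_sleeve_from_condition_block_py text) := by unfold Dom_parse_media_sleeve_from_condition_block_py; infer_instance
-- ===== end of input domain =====

-- B replaces A's forward overwrite loop by a back-to-front scan that keeps the first match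
-- per key (same value: last in document order) and stops once both are found (objective: alternative).

-- ===== PORT A =====
-- the body of A's `for line in …` loop (strings are handled at the List Char level of PySem.Chars)
def pvStepA (st : List Char × List Char) (line : List Char) : List Char × List Char :=
  let t := PySem.Chars.strip line
  if t.isEmpty then st
  else
    let low := PySem.Chars.lower t
    if PySem.Chars.startswith low "media:".toList then
      (PySem.Chars.strip ((PySem.Chars.splitOnMax t [':'] 1).getD 1 []), st.2)
    else if PySem.Chars.startswith low "sleeve:".toList then
      (st.1, PySem.Chars.strip ((PySem.Chars.splitOnMax t [':'] 1).getD 1 []))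
    else st

def parse_media_sleeve_from_condition_block_py (text : String) : String × String :=
  if text = "" || (PySem.Chars.strip text.toList).isEmpty then ("", "")
  else
    let st := (PySem.Chars.splitOn
      (PySem.Chars.replace text.toList "\r\n".toList "\n".toList) "\n".toList).foldl pvStepA ([], [])
    (String.ofList st.1, String.ofList st.2)

-- ===== PORT B =====
-- B's `for line in reversed(lines)` loop with its early break
def pvLoopB : List (List Char) → Option (List Char) → Option (List Char) →
    Option (List Char) × Option (List Char)
  | [], m, s => (m, s)
  | line :: rest, m, s =>
    let t := PySem.Chars.strip line
    let low := PySem.Chars.lower t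
    let m' := if m.isNone && PySem.Chars.startswith low "media:".toList then
        some (PySem.Chars.strip (PySem.Chars.slice t (some 6) none)) else m
    let s' := if s.isNone && PySem.Chars.startswith low "sleeve:".toList then
        some (PySem.Chars.strip (PySem.Chars.slice t (some 7) none)) else s
    if m'.isSome && s'.isSome then (m', s') else pvLoopB rest m' s'

def parse_media_sleeve_from_condition_block_py_alt (text : String) : String × String :=
  let p := pvLoopB ((PySem.Chars.splitOn
      (PySem.Chars.replace text.toList "\r\n".toList "\n".toList) "\n".toList).reverse) none none
  (String.ofList (p.1.getD []), String.ofList (p.2.getD []))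

-- ===== PRECONDITION & SPEC =====
def Spec_parse_media_sleeve_from_condition_block_py (text : String) (out : String × String) : Prop := out = parse_media_sleeve_from_condition_block_py_alt text
instance (text : String) (out : String × String) : Decidable (Spec_parse_media_sleeve_from_condition_block_py text out) := by unfold Spec_parse_media_sleeve_from_condition_block_py; infer_instance

-- ===== CLAIM (what is proved, stated in full; the proofs are below) =====
def Claim_equal_parse_media_sleeve_from_condition_block_py : Prop := ∀ (text : String), Dom_parse_media_sleeve_from_condition_block_py text → Spec_parse_media_sleeve_from_condition_block_py text (parse_media_sleeve_from_condition_block_py text)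

-- ===== LEMMAS AND PROOFS =====

-- canonical value of a line for one key ("media:" with k = 6, "sleeve:" with k = 7)
def pvVal? (k : Nat) (key : List Char) (line : List Char) : Option (List Char) :=
  let t := PySem.Chars.strip line
  if PySem.Chars.startswith (PySem.Chars.lower t) key then
    some (PySem.Chars.strip (t.drop k)) else none

theorem pv_media_toList : "media:".toList = ['m','e','d','i','a',':'] := rfl
theorem pv_sleeve_toList : "sleeve:".toList = ['s','l','e','e','v','e',':'] := rfl

theorem pv_goZero (sep : List Char) (fuel : Nat) (l cur : List Char) (acc : List (List Char)) :
    PySem.Chars.splitOnMax.go sep fuel 0 l cur acc = ((cur.reverse ++ l) :: acc).reverse := by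
  cases fuel with
  | zero => simp [PySem.Chars.splitOnMax.go]
  | succ f =>
    cases l with
    | nil => simp [PySem.Chars.splitOnMax.go]
    | cons c rest => simp [PySem.Chars.splitOnMax.go]

theorem pv_goOne (pre : List Char) (fuel : Nat) (suf cur : List Char) (acc : List (List Char))
    (hno : ':' ∉ pre) (hf : pre.length < fuel) :
    PySem.Chars.splitOnMax.go [':'] fuel 1 (pre ++ ':' :: suf) cur acc
      = acc.reverse ++ [cur.reverse ++ pre, suf] := by
  induction pre generalizing fuel cur acc with
  | nil =>
    cases fuel with
    | zero => omega
    | succ f =>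
      simp [PySem.Chars.splitOnMax.go, List.isPrefixOf, pv_goZero]
  | cons c pre' ih =>
    have hc : ¬ (c = ':') := by
      intro h; exact hno (by simp [h])
    have hcc : ((':' : Char) == c) = false := by
      simp only [beq_eq_false_iff_ne, ne_eq]
      intro h; exact hc h.symm
    cases fuel with
    | zero => omega
    | succ f =>
      have hno' : ':' ∉ pre' := fun h => hno (List.mem_cons_of_mem _ h)
      have hf' : pre'.length < f := by simp at hf; omega
      simp [PySem.Chars.splitOnMax.go, List.isPrefixOf, hcc, ih f (c :: cur) acc hno' hf']

theorem pv_splitColon (pre suf : List Char) (hno : ':' ∉ pre) :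
    PySem.Chars.splitOnMax (pre ++ ':' :: suf) [':'] 1 = [pre, suf] := by
  unfold PySem.Chars.splitOnMax
  rw [if_neg (by norm_num)]
  rw [show ((1 : Int)).toNat = 1 from rfl]
  rw [pv_goOne pre _ suf [] [] hno (by simp)]
  simp

theorem pv_lowerChar_colon (c : Char) (h : PySem.Chars.lowerChar c = ':') : c = ':' := by
  unfold PySem.Chars.lowerChar at h
  split at h
  · exfalso
    rename_i hup
    simp only [PySem.Chars.isupper, Bool.and_eq_true, decide_eq_true_eq] at hup
    have h2 : (65 : UInt32) ≤ c.val := hup.1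
    have h3 : c.val ≤ (90 : UInt32) := hup.2
    have h2' : 65 ≤ c.toNat := UInt32.le_iff_toNat_le.1 h2
    have h3' : c.toNat ≤ 90 := UInt32.le_iff_toNat_le.1 h3
    have hv : (c.toNat + 32).isValidChar := Or.inl (by omega)
    have h1 : (Char.ofNat (c.toNat + 32)).toNat = c.toNat + 32 := by
      rw [Char.toNat_ofNat, if_pos hv]
    rw [h] at h1
    have h58 : (':' : Char).toNat = 58 := by decide
    omega
  · exact h

theorem pv_key_facts (t key : List Char) (n : Nat)
    (hn : key.length = n + 1) (hcol : key[n]? = some ':')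
    (hpre : ∀ i, i < n → key[i]? ≠ some ':')
    (h : PySem.Chars.startswith (PySem.Chars.lower t) key = true) :
    t[n]? = some ':' ∧ ':' ∉ t.take n := by
  rw [PySem.Chars.startswith_iff] at h
  obtain ⟨u, hu⟩ := h
  have hmap : PySem.Chars.lower t = t.map PySem.Chars.lowerChar := rfl
  rw [hmap] at hu
  have hget : ∀ i, i < key.length → t[i]?.map PySem.Chars.lowerChar = key[i]? := by
    intro i hi
    have h0 : (t.map PySem.Chars.lowerChar)[i]? = (key ++ u)[i]? := by rw [hu]
    rw [List.getElem?_map, List.getElem?_append_left hi] at h0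
    exact h0
  constructor
  · have h5 := hget n (by omega)
    rw [hcol] at h5
    rcases Option.map_eq_some_iff.1 h5 with ⟨c, hc, hlc⟩
    rw [hc, pv_lowerChar_colon c hlc]
  · intro hmem
    obtain ⟨i, hi, hti⟩ := List.mem_iff_getElem.1 hmem
    have hin : i < n := by
      have := hi; simp [List.length_take] at this; omega
    have hilen : i < t.length := by
      have := hi; simp [List.length_take] at this; omega
    have hit : t[i]? = some ':' := by
      have hgt : t[i] = ':' := by
        rw [← hti]; simp [List.getElem_take]
      simp [List.getElem?_eq_getElem hilen, hgt]
    have h0 := hget i (by omega)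
    rw [hit] at h0
    have hcolon : PySem.Chars.lowerChar ':' = ':' := by decide
    rw [Option.map_some, hcolon] at h0
    exact hpre i hin h0.symm

theorem pv_split_getD (t : List Char) (n : Nat)
    (hcol : t[n]? = some ':') (hno : ':' ∉ t.take n) :
    (PySem.Chars.splitOnMax t [':'] 1)[1]?.getD [] = t.drop (n + 1) := by
  obtain ⟨hlen, hgn⟩ := List.getElem?_eq_some_iff.1 hcol
  have ht : t = t.take n ++ ':' :: t.drop (n + 1) := by
    conv_lhs => rw [← List.take_append_drop n t]
    rw [List.drop_eq_getElem_cons hlen, hgn]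
  calc (PySem.Chars.splitOnMax t [':'] 1)[1]?.getD []
      = (PySem.Chars.splitOnMax (t.take n ++ ':' :: t.drop (n + 1)) [':'] 1)[1]?.getD [] := by
        rw [← ht]
    _ = [t.take n, t.drop (n + 1)][1]?.getD [] := by rw [pv_splitColon _ _ hno]
    _ = t.drop (n + 1) := rfl

theorem pv_not_both (low : List Char)
    (hm : PySem.Chars.startswith low ['m','e','d','i','a',':'] = true)
    (hs : PySem.Chars.startswith low ['s','l','e','e','v','e',':'] = true) : False := by
  rw [PySem.Chars.startswith_iff] at hm hs
  obtain ⟨u, hu⟩ := hm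
  obtain ⟨v, hv⟩ := hs
  rw [← hu] at hv
  simp at hv

theorem pv_findSome?_singleton {α β : Type} (f : α → Option β) (a : α) :
    List.findSome? f [a] = f a := by
  cases h : f a <;> simp [List.findSome?_cons, h]

theorem pv_findSome?_cons {α β : Type} (f : α → Option β) (a : α) (l : List α) :
    List.findSome? f (a :: l) = (f a).or (List.findSome? f l) := by
  cases h : f a <;> simp [List.findSome?_cons, h]

theorem pv_or_getD {α : Type} (a b : Option α) (d : α) :
    (a.or b).getD d = a.getD (b.getD d) := by
  cases a <;> simp

theorem pv_stepA_eq (st : List Char × List Char) (line : List Char) :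
    pvStepA st line = ((pvVal? 6 ['m','e','d','i','a',':'] line).getD st.1,
                       (pvVal? 7 ['s','l','e','e','v','e',':'] line).getD st.2) := by
  unfold pvStepA pvVal?
  simp only [pv_media_toList, pv_sleeve_toList]
  by_cases he : (PySem.Chars.strip line).isEmpty
  · have h0 : PySem.Chars.strip line = [] := List.isEmpty_iff.1 he
    simp [he, h0, PySem.Chars.lower, PySem.Chars.startswith, List.isPrefixOf]
  · by_cases hm : PySem.Chars.startswith
        (PySem.Chars.lower (PySem.Chars.strip line)) ['m','e','d','i','a',':'] = true
    · have hf := pv_key_facts (PySem.Chars.strip line) ['m','e','d','i','a',':'] 5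
        (by decide) (by decide) (by decide) hm
      have hns : PySem.Chars.startswith
          (PySem.Chars.lower (PySem.Chars.strip line)) ['s','l','e','e','v','e',':'] = false := by
        by_contra hq
        exact pv_not_both _ hm (by simpa using hq)
      simp [he, hm, hns, pv_split_getD _ 5 hf.1 hf.2]
    · by_cases hs : PySem.Chars.startswith
          (PySem.Chars.lower (PySem.Chars.strip line)) ['s','l','e','e','v','e',':'] = true
      · have hf := pv_key_facts (PySem.Chars.strip line) ['s','l','e','e','v','e',':'] 6
          (by decide) (by decide) (by decide) hs
        simp [he, hm, hs, pv_split_getD _ 6 hf.1 hf.2]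
      · simp [he, hm, hs]

theorem pv_foldl (ls : List (List Char)) (m s : List Char) :
    ls.foldl pvStepA (m, s)
      = ((ls.reverse.findSome? (pvVal? 6 ['m','e','d','i','a',':'])).getD m,
         (ls.reverse.findSome? (pvVal? 7 ['s','l','e','e','v','e',':'])).getD s) := by
  induction ls generalizing m s with
  | nil => simp
  | cons x ls ih =>
    rw [List.foldl_cons, pv_stepA_eq, ih]
    rw [List.reverse_cons, List.findSome?_append, List.findSome?_append,
      pv_or_getD, pv_or_getD, pv_findSome?_singleton, pv_findSome?_singleton]

theorem pv_loopB (rls : List (List Char)) (m s : Option (List Char)) :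
    pvLoopB rls m s
      = (m.or (rls.findSome? (pvVal? 6 ['m','e','d','i','a',':'])),
         s.or (rls.findSome? (pvVal? 7 ['s','l','e','e','v','e',':']))) := by
  induction rls generalizing m s with
  | nil => simp [pvLoopB]
  | cons line rest ih =>
    have hslice6 : PySem.Chars.slice (PySem.Chars.strip line) (some 6) none
        = (PySem.Chars.strip line).drop 6 := by
      show PySem.List.slice _ (some 6) none = _
      have h6 : Int.toNat 6 = 6 := by decide
      rw [PySem.List.slice_from _ (by norm_num), h6]
    have hslice7 : PySem.Chars.slice (PySem.Chars.strip line) (some 7) none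
        = (PySem.Chars.strip line).drop 7 := by
      show PySem.List.slice _ (some 7) none = _
      have h7 : Int.toNat 7 = 7 := by decide
      rw [PySem.List.slice_from _ (by norm_num), h7]
    have hm' : (if m.isNone && PySem.Chars.startswith
          (PySem.Chars.lower (PySem.Chars.strip line)) "media:".toList then
          some (PySem.Chars.strip (PySem.Chars.slice (PySem.Chars.strip line) (some 6) none))
        else m) = m.or (pvVal? 6 ['m','e','d','i','a',':'] line) := by
      cases m with
      | some a => simp
      | none =>
        unfold pvVal?
        simp only [pv_media_toList, Option.isNone_none, Bool.true_and, Option.none_or,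
          hslice6]
    have hs' : (if s.isNone && PySem.Chars.startswith
          (PySem.Chars.lower (PySem.Chars.strip line)) "sleeve:".toList then
          some (PySem.Chars.strip (PySem.Chars.slice (PySem.Chars.strip line) (some 7) none))
        else s) = s.or (pvVal? 7 ['s','l','e','e','v','e',':'] line) := by
      cases s with
      | some a => simp
      | none =>
        unfold pvVal?
        simp only [pv_sleeve_toList, Option.isNone_none, Bool.true_and, Option.none_or,
          hslice7]
    show (if _ && _ then _ else pvLoopB rest _ _) = _
    rw [hm', hs']
    by_cases hb : ((m.or (pvVal? 6 ['m','e','d','i','a',':'] line)).isSome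
        && (s.or (pvVal? 7 ['s','l','e','e','v','e',':'] line)).isSome) = true
    · rw [if_pos hb]
      rw [Bool.and_eq_true] at hb
      obtain ⟨hb1, hb2⟩ := hb
      rcases Option.isSome_iff_exists.1 hb1 with ⟨a, ha⟩
      rcases Option.isSome_iff_exists.1 hb2 with ⟨b, hbv⟩
      rw [pv_findSome?_cons, pv_findSome?_cons, ← Option.or_assoc, ← Option.or_assoc,
        ha, hbv]
      simp
    · rw [if_neg hb, ih]
      rw [pv_findSome?_cons, pv_findSome?_cons, ← Option.or_assoc, ← Option.or_assoc]

theorem pv_strip_empty_all (cs : List Char) (h : (PySem.Chars.strip cs).isEmpty = true) :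
    ∀ c ∈ cs, PySem.Chars.isspace c = true := by
  intro c hc
  have h0 : PySem.Chars.strip cs = [] := List.isEmpty_iff.1 h
  unfold PySem.Chars.strip PySem.Chars.rstrip PySem.Chars.lstrip at h0
  have h1 : List.dropWhile PySem.Chars.isspace
      ((List.dropWhile PySem.Chars.isspace cs).reverse) = [] := by
    have := congrArg List.reverse h0
    simpa using this
  have h2 := List.dropWhile_eq_nil_iff.1 h1
  have hsplit := List.takeWhile_append_dropWhile (p := PySem.Chars.isspace) (l := cs)
  rw [← hsplit] at hc
  rcases List.mem_append.1 hc with hh | hh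
  · exact List.mem_takeWhile_imp hh
  · exact h2 c (List.mem_reverse.2 hh)

theorem pv_replace_go_mem (old new : List Char) (fuel : Nat) :
    ∀ (l acc : List Char) (c : Char),
      c ∈ PySem.Chars.replace.go old new fuel l acc → c ∈ l ∨ c ∈ new ∨ c ∈ acc := by
  induction fuel with
  | zero =>
    intro l acc c hc
    simp only [PySem.Chars.replace.go] at hc
    rcases List.mem_append.1 hc with h | h
    · exact Or.inr (Or.inr (List.mem_reverse.1 h))
    · exact Or.inl h
  | succ f ih =>
    intro l acc c hc
    cases l with
    | nil =>
      simp only [PySem.Chars.replace.go] at hc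
      exact Or.inr (Or.inr (List.mem_reverse.1 hc))
    | cons a tail =>
      simp only [PySem.Chars.replace.go] at hc
      split at hc
      · rcases ih _ _ _ hc with h | h | h
        · exact Or.inl (List.mem_of_mem_drop h)
        · exact Or.inr (Or.inl h)
        · rcases List.mem_append.1 h with h' | h'
          · exact Or.inr (Or.inl (List.mem_reverse.1 h'))
          · exact Or.inr (Or.inr h')
      · rcases ih _ _ _ hc with h | h | h
        · exact Or.inl (List.mem_cons_of_mem _ h)
        · exact Or.inr (Or.inl h)
        · rcases List.mem_cons.1 h with h' | h'
          · exact Or.inl (by simp [h'])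
          · exact Or.inr (Or.inr h')

theorem pv_replace_mem (cs old new : List Char) (hold : old ≠ [])
    (c : Char) (hc : c ∈ PySem.Chars.replace cs old new) : c ∈ cs ∨ c ∈ new := by
  unfold PySem.Chars.replace at hc
  rw [if_neg (by simp [hold])] at hc
  rcases pv_replace_go_mem old new cs.length cs [] c hc with h | h | h
  · exact Or.inl h
  · exact Or.inr h
  · simp at h

theorem pv_splitOn_go_mem (sep : List Char) (fuel : Nat) :
    ∀ (l cur : List Char) (acc : List (List Char)) (p : List Char),
      p ∈ PySem.Chars.splitOn.go sep fuel l cur acc →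
        (∀ c ∈ p, c ∈ l ∨ c ∈ cur) ∨ p ∈ acc := by
  induction fuel with
  | zero =>
    intro l cur acc p hp
    simp only [PySem.Chars.splitOn.go, List.mem_reverse] at hp
    rcases List.mem_cons.1 hp with h | h
    · left; intro c hc
      rw [h] at hc
      rcases List.mem_append.1 hc with h' | h'
      · exact Or.inr (List.mem_reverse.1 h')
      · exact Or.inl h'
    · right; exact h
  | succ f ih =>
    intro l cur acc p hp
    cases l with
    | nil =>
      simp only [PySem.Chars.splitOn.go, List.mem_reverse] at hp
      rcases List.mem_cons.1 hp with h | h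
      · left; intro c hc; rw [h] at hc; exact Or.inr (List.mem_reverse.1 hc)
      · right; exact h
    | cons a tail =>
      simp only [PySem.Chars.splitOn.go] at hp
      split at hp
      · rcases ih _ _ _ _ hp with h | h
        · left; intro c hc
          rcases h c hc with h' | h'
          · exact Or.inl (List.mem_of_mem_drop h')
          · simp at h'
        · rcases List.mem_cons.1 h with h' | h'
          · left; intro c hc; rw [h'] at hc; exact Or.inr (List.mem_reverse.1 hc)
          · right; exact h'
      · rcases ih _ _ _ _ hp with h | h
        · left; intro c hc
          rcases h c hc with h' | h'
          · exact Or.inl (List.mem_cons_of_mem _ h')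
          · rcases List.mem_cons.1 h' with h'' | h''
            · exact Or.inl (by simp [h''])
            · exact Or.inr h''
        · right; exact h

theorem pv_splitOn_mem (cs sep p : List Char) (hp : p ∈ PySem.Chars.splitOn cs sep)
    (c : Char) (hc : c ∈ p) : c ∈ cs := by
  unfold PySem.Chars.splitOn at hp
  rcases pv_splitOn_go_mem sep (cs.length + 1) cs [] [] p hp with h | h
  · rcases h c hc with h' | h'
    · exact h'
    · simp at h'
  · simp at h

theorem pv_val_none_of_space (k : Nat) (key : List Char) (hkey : key ≠ [])
    (line : List Char) (h : ∀ c ∈ line, PySem.Chars.isspace c = true) :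
    pvVal? k key line = none := by
  unfold pvVal?
  have h1 : List.dropWhile PySem.Chars.isspace line = [] := List.dropWhile_eq_nil_iff.2 h
  have h2 : PySem.Chars.strip line = [] := by
    unfold PySem.Chars.strip PySem.Chars.lstrip PySem.Chars.rstrip
    rw [h1]
    rfl
  rw [h2]
  cases key with
  | nil => exact absurd rfl hkey
  | cons a k' => simp [PySem.Chars.lower, PySem.Chars.startswith, List.isPrefixOf]

-- ===== VERDICT (by name: the statement is the Claim_ definition above) =====
theorem parse_media_sleeve_from_condition_block_py_spec : Claim_equal_parse_media_sleeve_from_condition_block_py := by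
  intro text _
  unfold Spec_parse_media_sleeve_from_condition_block_py
  unfold parse_media_sleeve_from_condition_block_py parse_media_sleeve_from_condition_block_py_alt
  rw [pv_loopB]
  split
  next hg =>
    rw [Bool.or_eq_true] at hg
    have hsp : ∀ c ∈ text.toList, PySem.Chars.isspace c = true := by
      rcases hg with hh | hh
      · have hT : text = "" := of_decide_eq_true hh
        intro c hc
        rw [hT] at hc
        simp at hc
      · exact pv_strip_empty_all _ hh
    have hland : ∀ p ∈ PySem.Chars.splitOn
        (PySem.Chars.replace text.toList "\r\n".toList "\n".toList) "\n".toList,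
        ∀ c ∈ p, PySem.Chars.isspace c = true := by
      intro p hp c hc
      have hcr := pv_splitOn_mem _ _ _ hp c hc
      rcases pv_replace_mem _ _ _ (by decide) c hcr with hh | hh
      · exact hsp c hh
      · have hcn : c = '\n' := by
          have hnl : "\n".toList = ['\n'] := rfl
          rw [hnl] at hh
          simpa using hh
        rw [hcn]; decide
    have hm : (PySem.Chars.splitOn
        (PySem.Chars.replace text.toList "\r\n".toList "\n".toList) "\n".toList).reverse.findSome?
          (pvVal? 6 ['m','e','d','i','a',':']) = none :=
      List.findSome?_eq_none_iff.2
        (fun p hp => pv_val_none_of_space _ _ (by decide) _ (hland p (List.mem_reverse.1 hp)))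
    have hsv : (PySem.Chars.splitOn
        (PySem.Chars.replace text.toList "\r\n".toList "\n".toList) "\n".toList).reverse.findSome?
          (pvVal? 7 ['s','l','e','e','v','e',':']) = none :=
      List.findSome?_eq_none_iff.2
        (fun p hp => pv_val_none_of_space _ _ (by decide) _ (hland p (List.mem_reverse.1 hp)))
    rw [hm, hsv]
    rfl
  next hg =>
    simp only [pv_foldl, Option.none_or]
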